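-- pv_equiv track=rewrite | github.com/afterdarksys/ads-sslmgr | validators/certificate_validator.py | _calculate_status
-- ===== SOURCE A (Python) =====
-- from typing import Dict, List, Optional, Tuple
--
-- def _calculate_status(findings: List[Dict]) -> Tuple[str, int]:
--     """Calculate overall validation status and risk score"""
--     if not findings:
--         return 'valid', 0
--
--     # Count findings by severity
--     severity_counts = {
--         'critical': 0,
--         'high': 0,
--         'medium': 0,
--         'low': 0,
--         'info': 0
--     }
--
--     for finding in findings:
--         severity = finding.get('severity', 'info')
--         severity_counts[severity] = severity_counts.get(severity, 0) + 1
--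
--     # Calculate risk score (0-100)
--     risk_score = (
--         severity_counts['critical'] * 40 +
--         severity_counts['high'] * 20 +
--         severity_counts['medium'] * 10 +
--         severity_counts['low'] * 3 +
--         severity_counts['info'] * 1
--     )
--
--     # Determine overall status
--     if severity_counts['critical'] > 0:
--         status = 'critical'
--     elif severity_counts['high'] > 0:
--         status = 'warning'
--     elif severity_counts['medium'] > 0:
--         status = 'needs_attention'
--     elif severity_counts['low'] > 0:
--         status = 'minor_issues'
--     else:
--         status = 'valid'
--
--     return status, min(risk_score, 100)
-- ===== SOURCE B (Python) =====
-- from typing import Dict, List, Tuple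
--
-- _SEV_TABLE = {
--     'critical': (40, 4),
--     'high': (20, 3),
--     'medium': (10, 2),
--     'low': (3, 1),
--     'info': (1, 0),
-- }
--
-- _STATUS_BY_PRIORITY = {4: 'critical', 3: 'warning', 2: 'needs_attention', 1: 'minor_issues'}
--
-- def _calculate_status(findings: List[Dict]) -> Tuple[str, int]:
--     """Calculate overall validation status and risk score (single pass, two scalars)."""
--     risk_score = 0
--     max_priority = 0
--     for finding in findings:
--         weight, priority = _SEV_TABLE.get(finding.get('severity', 'info'), (0, 0))
--         risk_score += weight
--         max_priority = max(max_priority, priority)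
--     status = _STATUS_BY_PRIORITY.get(max_priority, 'valid')
--     return status, min(risk_score, 100)
-- ===== Notes on version B (the rewrite author's own statement) =====
-- stated objective: simpler
-- what changed: Replaces A's severity-count dictionary plus separate weighted-sum and if-chain passes by a single fold keeping two scalars (running risk score and running max priority) and a final priority-to-status table lookup; no special empty-findings branch.
import Mathlib
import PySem

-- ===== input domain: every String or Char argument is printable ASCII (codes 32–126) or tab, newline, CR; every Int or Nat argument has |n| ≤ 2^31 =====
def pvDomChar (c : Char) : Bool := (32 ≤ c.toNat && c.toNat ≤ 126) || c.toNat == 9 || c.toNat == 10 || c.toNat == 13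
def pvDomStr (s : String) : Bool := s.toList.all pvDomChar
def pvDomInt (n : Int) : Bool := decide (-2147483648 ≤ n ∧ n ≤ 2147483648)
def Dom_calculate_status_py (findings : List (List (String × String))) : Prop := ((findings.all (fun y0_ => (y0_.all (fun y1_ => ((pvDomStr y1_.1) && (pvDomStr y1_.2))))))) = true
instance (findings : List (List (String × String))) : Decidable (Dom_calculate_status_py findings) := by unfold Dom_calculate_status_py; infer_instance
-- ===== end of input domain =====

-- B replaces A's per-severity counting dict and two lookup passes by one pass keeping two
-- scalars (running risk score and max priority) plus a final priority->status map (objective: simpler).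


-- ===== PORT A =====
-- finding.get('severity', 'info') on the finding dict (assoc list, first-match lookup)
def pvSev (f : List (String × String)) : String :=
  (PySem.Dict.mk f).getD "severity" "info"

def calculate_status_py (findings : List (List (String × String))) : String × Int :=
  if findings = [] then ("valid", 0)
  else
    let init : PySem.Dict String Int :=
      PySem.Dict.mk [("critical", 0), ("high", 0), ("medium", 0), ("low", 0), ("info", 0)]
    let counts := findings.foldl (fun d f =>
      let severity := pvSev f
      d.insert severity (d.getD severity 0 + 1)) init
    let risk_score :=
      counts.getD "critical" 0 * 40 + counts.getD "high" 0 * 20 +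
      counts.getD "medium" 0 * 10 + counts.getD "low" 0 * 3 + counts.getD "info" 0 * 1
    let status :=
      if counts.getD "critical" 0 > 0 then "critical"
      else if counts.getD "high" 0 > 0 then "warning"
      else if counts.getD "medium" 0 > 0 then "needs_attention"
      else if counts.getD "low" 0 > 0 then "minor_issues"
      else "valid"
    (status, min risk_score 100)

-- ===== PORT B =====
def pvSevTable : PySem.Dict String (Int × Int) :=
  PySem.Dict.mk [("critical", (40, 4)), ("high", (20, 3)), ("medium", (10, 2)),
                 ("low", (3, 1)), ("info", (1, 0))]

def pvStatusByPriority : PySem.Dict Int String :=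
  PySem.Dict.mk [(4, "critical"), (3, "warning"), (2, "needs_attention"), (1, "minor_issues")]

def calculate_status_py_alt (findings : List (List (String × String))) : String × Int :=
  let st := findings.foldl (fun (acc : Int × Int) f =>
    let wp := pvSevTable.getD (pvSev f) (0, 0)
    (acc.1 + wp.1, max acc.2 wp.2)) (0, 0)
  (pvStatusByPriority.getD st.2 "valid", min st.1 100)

-- ===== PRECONDITION & SPEC =====
def Spec_calculate_status_py (findings : List (List (String × String))) (out : String × Int) : Prop := out = calculate_status_py_alt findings
instance (findings : List (List (String × String))) (out : String × Int) : Decidable (Spec_calculate_status_py findings out) := by unfold Spec_calculate_status_py; infer_instance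

-- ===== CLAIM (what is proved, stated in full; the proofs are below) =====
def Claim_equal_calculate_status_py : Prop := ∀ (findings : List (List (String × String))), Dom_calculate_status_py findings → Spec_calculate_status_py findings (calculate_status_py findings)

-- ===== LEMMAS AND PROOFS =====

-- weight of one severity string (proof-side view of pvSevTable)
def pvWt (s : String) : Int := (pvSevTable.getD s (0, 0)).1

theorem pvFoldlMap {α β γ : Type} (f : α → β) (g : γ → β → γ) (l : List α) (i : γ) :
    l.foldl (fun acc a => g acc (f a)) i = (l.map f).foldl g i := by
  induction l generalizing i with
  | nil => rfl
  | cons x l ih => simp only [List.foldl_cons, List.map_cons, ih]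

theorem pvWt_char (s : String) : pvWt s =
    if s = "critical" then 40 else if s = "high" then 20 else if s = "medium" then 10
    else if s = "low" then 3 else if s = "info" then 1 else 0 := by
  by_cases h1 : s = "critical"; · subst h1; decide
  by_cases h2 : s = "high"; · subst h2; decide
  by_cases h3 : s = "medium"; · subst h3; decide
  by_cases h4 : s = "low"; · subst h4; decide
  by_cases h5 : s = "info"; · subst h5; decide
  simp only [pvWt, pvSevTable, PySem.Dict.getD_eq_get?_getD, PySem.Dict.get?_mk_cons, beq_iff_eq]
  rw [if_neg (fun h => h1 h.symm), if_neg (fun h => h2 h.symm), if_neg (fun h => h3 h.symm),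
      if_neg (fun h => h4 h.symm), if_neg (fun h => h5 h.symm),
      if_neg h1, if_neg h2, if_neg h3, if_neg h4, if_neg h5]
  rfl

def pvPr (s : String) : Int := (pvSevTable.getD s (0, 0)).2
def pvM (ss : List String) : Int := ss.foldr (fun s acc => max (pvPr s) acc) 0

theorem pvPr_char (s : String) : pvPr s =
    if s = "critical" then 4 else if s = "high" then 3 else if s = "medium" then 2
    else if s = "low" then 1 else 0 := by
  by_cases h1 : s = "critical"; · subst h1; decide
  by_cases h2 : s = "high"; · subst h2; decide
  by_cases h3 : s = "medium"; · subst h3; decide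
  by_cases h4 : s = "low"; · subst h4; decide
  by_cases h5 : s = "info"; · subst h5; decide
  simp only [pvPr, pvSevTable, PySem.Dict.getD_eq_get?_getD, PySem.Dict.get?_mk_cons, beq_iff_eq]
  rw [if_neg (fun h => h1 h.symm), if_neg (fun h => h2 h.symm), if_neg (fun h => h3 h.symm),
      if_neg (fun h => h4 h.symm), if_neg (fun h => h5 h.symm),
      if_neg h1, if_neg h2, if_neg h3, if_neg h4]
  rfl

theorem pvM_nonneg (ss : List String) : 0 ≤ pvM ss := by
  induction ss with
  | nil => simp [pvM]
  | cons x ss ih => exact le_trans ih (le_max_right _ _)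

theorem pvFoldB (ss : List String) (s0 p0 : Int) (hp0 : 0 ≤ p0) :
    ss.foldl (fun (acc : Int × Int) x => (acc.1 + pvWt x, max acc.2 (pvPr x))) (s0, p0)
      = (s0 + (ss.map pvWt).sum, max p0 (pvM ss)) := by
  induction ss generalizing s0 p0 with
  | nil =>
    simp only [List.foldl_nil, List.map_nil, List.sum_nil, add_zero]
    rw [show pvM [] = 0 from rfl, max_eq_left hp0]
  | cons x ss ih =>
    rw [List.foldl_cons, ih (s0 + pvWt x) (max p0 (pvPr x)) (le_trans hp0 (le_max_left _ _))]
    refine Prod.ext ?_ ?_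
    · simp only [List.map_cons, List.sum_cons]; ring
    · show max (max p0 (pvPr x)) (pvM ss) = max p0 (pvM (x :: ss))
      rw [show pvM (x :: ss) = max (pvPr x) (pvM ss) from rfl, max_assoc]





theorem pvSum_counts (ss : List String) :
    (ss.map pvWt).sum =
      (ss.count "critical" : Int) * 40 + (ss.count "high" : Int) * 20 +
      (ss.count "medium" : Int) * 10 + (ss.count "low" : Int) * 3 + (ss.count "info" : Int) * 1 := by
  induction ss with
  | nil => simp
  | cons x ss ih =>
    simp only [List.map_cons, List.sum_cons, ih]
    by_cases h1 : x = "critical"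
    · subst h1
      rw [List.count_cons_self, List.count_cons_of_ne (show ("critical":String) ≠ "high" by decide), List.count_cons_of_ne (show ("critical":String) ≠ "medium" by decide), List.count_cons_of_ne (show ("critical":String) ≠ "low" by decide), List.count_cons_of_ne (show ("critical":String) ≠ "info" by decide), show pvWt "critical" = 40 from by decide]
      push_cast; ring
    by_cases h2 : x = "high"
    · subst h2
      rw [List.count_cons_of_ne (show ("high":String) ≠ "critical" by decide), List.count_cons_self, List.count_cons_of_ne (show ("high":String) ≠ "medium" by decide), List.count_cons_of_ne (show ("high":String) ≠ "low" by decide), List.count_cons_of_ne (show ("high":String) ≠ "info" by decide), show pvWt "high" = 20 from by decide]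
      push_cast; ring
    by_cases h3 : x = "medium"
    · subst h3
      rw [List.count_cons_of_ne (show ("medium":String) ≠ "critical" by decide), List.count_cons_of_ne (show ("medium":String) ≠ "high" by decide), List.count_cons_self, List.count_cons_of_ne (show ("medium":String) ≠ "low" by decide), List.count_cons_of_ne (show ("medium":String) ≠ "info" by decide), show pvWt "medium" = 10 from by decide]
      push_cast; ring
    by_cases h4 : x = "low"
    · subst h4
      rw [List.count_cons_of_ne (show ("low":String) ≠ "critical" by decide), List.count_cons_of_ne (show ("low":String) ≠ "high" by decide), List.count_cons_of_ne (show ("low":String) ≠ "medium" by decide), List.count_cons_self, List.count_cons_of_ne (show ("low":String) ≠ "info" by decide), show pvWt "low" = 3 from by decide]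
      push_cast; ring
    by_cases h5 : x = "info"
    · subst h5
      rw [List.count_cons_of_ne (show ("info":String) ≠ "critical" by decide), List.count_cons_of_ne (show ("info":String) ≠ "high" by decide), List.count_cons_of_ne (show ("info":String) ≠ "medium" by decide), List.count_cons_of_ne (show ("info":String) ≠ "low" by decide), List.count_cons_self, show pvWt "info" = 1 from by decide]
      push_cast; ring
    rw [List.count_cons_of_ne h1, List.count_cons_of_ne h2, List.count_cons_of_ne h3, List.count_cons_of_ne h4, List.count_cons_of_ne h5, pvWt_char x, if_neg h1, if_neg h2, if_neg h3, if_neg h4, if_neg h5]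
    push_cast; ring

theorem pvM_char (ss : List String) :
    pvM ss =
      if 0 < ss.count "critical" then 4 else if 0 < ss.count "high" then 3
      else if 0 < ss.count "medium" then 2 else if 0 < ss.count "low" then 1 else 0 := by
  induction ss with
  | nil => simp [pvM]
  | cons x ss ih =>
    rw [show pvM (x :: ss) = max (pvPr x) (pvM ss) from rfl, ih]
    by_cases h1 : x = "critical"
    · subst h1
      rw [List.count_cons_self, List.count_cons_of_ne (show ("critical":String) ≠ "high" by decide), List.count_cons_of_ne (show ("critical":String) ≠ "medium" by decide), List.count_cons_of_ne (show ("critical":String) ≠ "low" by decide), show pvPr "critical" = 4 from by decide]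
      split_ifs <;> first | decide | (exfalso; omega)
    by_cases h2 : x = "high"
    · subst h2
      rw [List.count_cons_of_ne (show ("high":String) ≠ "critical" by decide), List.count_cons_self, List.count_cons_of_ne (show ("high":String) ≠ "medium" by decide), List.count_cons_of_ne (show ("high":String) ≠ "low" by decide), show pvPr "high" = 3 from by decide]
      split_ifs <;> first | decide | (exfalso; omega)
    by_cases h3 : x = "medium"
    · subst h3
      rw [List.count_cons_of_ne (show ("medium":String) ≠ "critical" by decide), List.count_cons_of_ne (show ("medium":String) ≠ "high" by decide), List.count_cons_self, List.count_cons_of_ne (show ("medium":String) ≠ "low" by decide), show pvPr "medium" = 2 from by decide]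
      split_ifs <;> first | decide | (exfalso; omega)
    by_cases h4 : x = "low"
    · subst h4
      rw [List.count_cons_of_ne (show ("low":String) ≠ "critical" by decide), List.count_cons_of_ne (show ("low":String) ≠ "high" by decide), List.count_cons_of_ne (show ("low":String) ≠ "medium" by decide), List.count_cons_self, show pvPr "low" = 1 from by decide]
      split_ifs <;> first | decide | (exfalso; omega)
    by_cases h5 : x = "info"
    · subst h5
      rw [List.count_cons_of_ne (show ("info":String) ≠ "critical" by decide), List.count_cons_of_ne (show ("info":String) ≠ "high" by decide), List.count_cons_of_ne (show ("info":String) ≠ "medium" by decide), List.count_cons_of_ne (show ("info":String) ≠ "low" by decide), show pvPr "info" = 0 from by decide]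
      split_ifs <;> first | decide | (exfalso; omega)
    rw [List.count_cons_of_ne h1, List.count_cons_of_ne h2, List.count_cons_of_ne h3, List.count_cons_of_ne h4, pvPr_char x, if_neg h1, if_neg h2, if_neg h3, if_neg h4]
    split_ifs <;> first | decide | (exfalso; omega)

-- ===== VERDICT (by name: the statement is the Claim_ definition above) =====
theorem calculate_status_py_spec : Claim_equal_calculate_status_py := by
  intro findings _
  unfold Spec_calculate_status_py calculate_status_py calculate_status_py_alt
  by_cases hnil : findings = []
  · subst hnil; decide
  · simp only [if_neg hnil]
    rw [pvFoldlMap pvSev (fun (acc : Int × Int) x =>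
          (acc.1 + (pvSevTable.getD x (0, 0)).1, max acc.2 (pvSevTable.getD x (0, 0)).2)),
        pvFoldlMap pvSev (fun (d : PySem.Dict String Int) x => d.insert x (d.getD x 0 + 1))]
    rw [show (fun (acc : Int × Int) x =>
          (acc.1 + (pvSevTable.getD x (0, 0)).1, max acc.2 (pvSevTable.getD x (0, 0)).2))
        = (fun (acc : Int × Int) x => (acc.1 + pvWt x, max acc.2 (pvPr x))) from rfl]
    rw [pvFoldB (findings.map pvSev) 0 0 le_rfl]
    rw [PySem.Dict.getD_foldl_insert_add_one, PySem.Dict.getD_foldl_insert_add_one,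
        PySem.Dict.getD_foldl_insert_add_one, PySem.Dict.getD_foldl_insert_add_one,
        PySem.Dict.getD_foldl_insert_add_one]
    rw [show (PySem.Dict.mk [("critical", (0:Int)), ("high", 0), ("medium", 0), ("low", 0), ("info", 0)]).getD "critical" 0 = 0 from by decide,
        show (PySem.Dict.mk [("critical", (0:Int)), ("high", 0), ("medium", 0), ("low", 0), ("info", 0)]).getD "high" 0 = 0 from by decide,
        show (PySem.Dict.mk [("critical", (0:Int)), ("high", 0), ("medium", 0), ("low", 0), ("info", 0)]).getD "medium" 0 = 0 from by decide,
        show (PySem.Dict.mk [("critical", (0:Int)), ("high", 0), ("medium", 0), ("low", 0), ("info", 0)]).getD "low" 0 = 0 from by decide,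
        show (PySem.Dict.mk [("critical", (0:Int)), ("high", 0), ("medium", 0), ("low", 0), ("info", 0)]).getD "info" 0 = 0 from by decide]
    rw [max_eq_right (pvM_nonneg (findings.map pvSev)), pvSum_counts (findings.map pvSev),
        pvM_char (findings.map pvSev)]
    simp only [zero_add, gt_iff_lt, Nat.cast_pos]
    congr 1
    split_ifs <;> decide
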